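-- pv_equiv track=rewrite | github.com/AroundInteger/zenodo-image-browser | src/ai/context_analyzer.py | _analyze_analysis_capabilities
-- ===== SOURCE A (Python) =====
-- from typing import Dict, List, Any
--
-- def _analyze_analysis_capabilities(files: List[Dict]) -> Dict[str, Any]:
--     """Analyze what analysis capabilities are available for the files."""
--     capabilities = {
--         'image_gallery': False,
--         'image_analysis': False,
--         'data_explorer': False,
--         'time_series_analysis': False,
--         'statistical_analysis': False,
--         'pattern_detection': False,
--         'file_preview': False
--     }
--
--     image_files = [f for f in files if f.get('type') == 'images']
--     data_files = [f for f in files if f.get('type') == 'data']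
--
--     # Image analysis capabilities
--     if image_files:
--         capabilities['image_gallery'] = True
--         capabilities['image_analysis'] = True
--         capabilities['file_preview'] = True
--
--         # Check for specific image types that support advanced analysis
--         image_extensions = [f.get('key', '').split('.')[-1].lower() for f in image_files if '.' in f.get('key', '')]
--         supported_formats = ['jpg', 'jpeg', 'png', 'tiff', 'tif', 'bmp', 'gif']
--
--         if any(ext in supported_formats for ext in image_extensions):
--             capabilities['pattern_detection'] = True
--
--     # Data analysis capabilities
--     if data_files:
--         capabilities['data_explorer'] = True
--         capabilities['statistical_analysis'] = True
--         capabilities['file_preview'] = True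
--
--         # Check for time series data
--         time_series_indicators = ['time', 'hour', 'day', 'week', 'month', 'year', 'sequence', 'series']
--         filenames = [f.get('key', '').lower() for f in data_files]
--         if any(indicator in ' '.join(filenames) for indicator in time_series_indicators):
--             capabilities['time_series_analysis'] = True
--
--     # Check for CSV files specifically
--     csv_files = [f for f in data_files if f.get('key', '').lower().endswith('.csv')]
--     if csv_files:
--         capabilities['data_explorer'] = True
--         capabilities['statistical_analysis'] = True
--
--     return capabilities
-- ===== SOURCE B (Python) =====
-- # Single sweep over the file list: all seven flags start False and are set in one
-- # loop; the CSV pass of A is redundant (a '.csv' data file already enables both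
-- # flags via the data branch) and therefore disappears.
-- def _analyze_analysis_capabilities(files):
--     SUPPORTED = ('jpg', 'jpeg', 'png', 'tiff', 'tif', 'bmp', 'gif')
--     INDICATORS = ('time', 'hour', 'day', 'week', 'month', 'year', 'sequence', 'series')
--     ig = ia = de = ts = sa = pd = fp = False
--     for f in files:
--         key = f.get('key', '')
--         if f.get('type') == 'images':
--             ig = ia = fp = True
--             pd = pd or ('.' in key and key.split('.')[-1].lower() in SUPPORTED)
--         elif f.get('type') == 'data':
--             de = sa = fp = True
--             low = key.lower()
--             ts = ts or any(ind in low for ind in INDICATORS)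
--     return {
--         'image_gallery': ig,
--         'image_analysis': ia,
--         'data_explorer': de,
--         'time_series_analysis': ts,
--         'statistical_analysis': sa,
--         'pattern_detection': pd,
--         'file_preview': fp,
--     }
-- ===== Notes on version B (the rewrite author's own statement) =====
-- stated objective: alternative
-- what changed: B replaces A's two filter passes, the list of extracted extensions, the ' '.join-then-substring-scan and the redundant CSV filter pass by a single loop over the files that accumulates all seven flags at once (the CSV pass disappears: a '.csv' data file already sets both flags in the data branch).
import Mathlib
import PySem

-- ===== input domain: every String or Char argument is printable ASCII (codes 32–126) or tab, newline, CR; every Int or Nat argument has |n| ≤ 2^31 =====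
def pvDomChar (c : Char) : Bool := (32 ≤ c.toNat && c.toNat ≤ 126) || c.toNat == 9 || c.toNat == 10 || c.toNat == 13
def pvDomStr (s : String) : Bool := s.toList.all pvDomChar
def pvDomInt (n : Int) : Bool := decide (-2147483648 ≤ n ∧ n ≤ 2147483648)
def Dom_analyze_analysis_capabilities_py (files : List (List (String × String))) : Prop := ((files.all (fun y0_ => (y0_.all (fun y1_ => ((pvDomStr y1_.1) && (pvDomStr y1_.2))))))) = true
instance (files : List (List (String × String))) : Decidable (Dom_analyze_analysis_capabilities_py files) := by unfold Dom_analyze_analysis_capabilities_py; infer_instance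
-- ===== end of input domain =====

-- B re-implements A's several filter/any passes as ONE loop over the files ('alternative'; the
-- redundant CSV pass of A is dropped — a '.csv' data file already sets both flags in the data branch).

-- shared helpers (used by both ports exactly where their Pythons compute the same sub-expression)
-- f.get('type') / f.get('key', '')
def pvGetType (f : List (String × String)) : Option String := PySem.Dict.get? (PySem.Dict.mk f) "type"
def pvGetKey (f : List (String × String)) : String := PySem.Dict.getD (PySem.Dict.mk f) "key" ""
-- key.split('.')[-1].lower()  (split? is some since "." ≠ ""; split never yields [], so [-1] is total;
-- the getD defaults are unreachable and only make the port total)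
def pvExtLower (key : String) : String :=
  PySem.Str.lower ((PySem.List.pyGet? ((PySem.Str.split? key ".").getD []) (-1)).getD "")
def pvSupported : List String := ["jpg", "jpeg", "png", "tiff", "tif", "bmp", "gif"]
def pvIndicators : List String := ["time", "hour", "day", "week", "month", "year", "sequence", "series"]

-- ===== PORT A =====
def analyze_analysis_capabilities_py (files : List (List (String × String))) : List (String × Bool) :=
  let capabilities : PySem.Dict String Bool := PySem.Dict.mk
    [("image_gallery", false), ("image_analysis", false), ("data_explorer", false),
     ("time_series_analysis", false), ("statistical_analysis", false),
     ("pattern_detection", false), ("file_preview", false)]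
  let image_files := files.filter (fun f => pvGetType f == some "images")
  let data_files := files.filter (fun f => pvGetType f == some "data")
  -- if image_files:
  let capabilities :=
    if image_files.isEmpty then capabilities else
      let c := ((capabilities.insert "image_gallery" true).insert "image_analysis" true).insert "file_preview" true
      let image_extensions := (image_files.filter (fun f => PySem.Str.isIn "." (pvGetKey f))).map (fun f => pvExtLower (pvGetKey f))
      if image_extensions.any (fun ext => pvSupported.contains ext) then c.insert "pattern_detection" true else c
  -- if data_files:
  let capabilities :=
    if data_files.isEmpty then capabilities else
      let c := ((capabilities.insert "data_explorer" true).insert "statistical_analysis" true).insert "file_preview" true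
      let filenames := data_files.map (fun f => PySem.Str.lower (pvGetKey f))
      if pvIndicators.any (fun ind => PySem.Str.isIn ind (PySem.Str.join " " filenames)) then
        c.insert "time_series_analysis" true
      else c
  let csv_files := data_files.filter (fun f => PySem.Str.endswith (PySem.Str.lower (pvGetKey f)) ".csv")
  let capabilities :=
    if csv_files.isEmpty then capabilities else
      (capabilities.insert "data_explorer" true).insert "statistical_analysis" true
  capabilities.items

-- ===== PORT B =====
structure PvCaps where
  ig : Bool
  ia : Bool
  de : Bool
  ts : Bool
  sa : Bool
  pd : Bool
  fp : Bool
deriving DecidableEq, Repr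

def pvStep (c : PvCaps) (f : List (String × String)) : PvCaps :=
  let key := pvGetKey f
  if pvGetType f == some "images" then
    { c with ig := true, ia := true, fp := true,
             pd := c.pd || (PySem.Str.isIn "." key && pvSupported.contains (pvExtLower key)) }
  else if pvGetType f == some "data" then
    { c with de := true, sa := true, fp := true,
             ts := c.ts || pvIndicators.any (fun ind => PySem.Str.isIn ind (PySem.Str.lower key)) }
  else c

def analyze_analysis_capabilities_py_alt (files : List (List (String × String))) : List (String × Bool) :=
  let st := files.foldl pvStep ⟨false, false, false, false, false, false, false⟩
  [("image_gallery", st.ig), ("image_analysis", st.ia), ("data_explorer", st.de),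
   ("time_series_analysis", st.ts), ("statistical_analysis", st.sa),
   ("pattern_detection", st.pd), ("file_preview", st.fp)]

-- ===== PRECONDITION & SPEC =====
def Spec_analyze_analysis_capabilities_py (files : List (List (String × String))) (out : List (String × Bool)) : Prop := out = analyze_analysis_capabilities_py_alt files
instance (files : List (List (String × String))) (out : List (String × Bool)) : Decidable (Spec_analyze_analysis_capabilities_py files out) := by unfold Spec_analyze_analysis_capabilities_py; infer_instance

-- ===== CLAIM (what is proved, stated in full; the proofs are below) =====
def Claim_equal_analyze_analysis_capabilities_py : Prop := ∀ (files : List (List (String × String))), Dom_analyze_analysis_capabilities_py files → Spec_analyze_analysis_capabilities_py files (analyze_analysis_capabilities_py files)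

-- ===== LEMMAS AND PROOFS =====

-- the per-file predicates B's single loop accumulates
def pvIsImg (f : List (String × String)) : Bool := pvGetType f == some "images"
def pvIsData (f : List (String × String)) : Bool := pvGetType f == some "data"
def pvPatOk (f : List (String × String)) : Bool :=
  pvIsImg f && (PySem.Str.isIn "." (pvGetKey f) && pvSupported.contains (pvExtLower (pvGetKey f)))
def pvTsOk (f : List (String × String)) : Bool :=
  pvIsData f && pvIndicators.any (fun ind => PySem.Str.isIn ind (PySem.Str.lower (pvGetKey f)))

theorem pvFoldl_spec (files : List (List (String × String))) (c : PvCaps) :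
    files.foldl pvStep c =
      ⟨c.ig || files.any pvIsImg, c.ia || files.any pvIsImg, c.de || files.any pvIsData,
       c.ts || files.any pvTsOk, c.sa || files.any pvIsData, c.pd || files.any pvPatOk,
       c.fp || (files.any pvIsImg || files.any pvIsData)⟩ := by
  induction files generalizing c with
  | nil => simp
  | cons f rest ih =>
    rw [List.foldl_cons, ih]
    cases c
    simp only [pvStep, pvIsImg, pvIsData, pvPatOk, pvTsOk, List.any_cons]
    by_cases hI : (pvGetType f == some "images") = true
    · have hD : (pvGetType f == some "data") = false := by
        rw [beq_iff_eq] at hI; simp [hI]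
      simp [hI, hD, Bool.or_assoc]
    · by_cases hD : (pvGetType f == some "data") = true
      · simp [hI, hD, Bool.or_assoc]
      · simp [hI, hD]

-- ---- substring-in-join: an indicator without spaces occurs in ' '.join(names) iff in some name ----

theorem pv_prefix_of_prefix_append_sep (sub : List Char) (hsp : ' ' ∉ sub) :
    ∀ (l t : List Char), sub <+: l ++ ' ' :: t → sub <+: l := by
  induction sub with
  | nil => intro l t _; exact List.nil_prefix
  | cons a sub ih =>
    intro l t h
    cases l with
    | nil =>
      exfalso
      rcases List.cons_prefix_cons.mp h with ⟨rfl, -⟩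
      exact hsp List.mem_cons_self
    | cons b l =>
      rcases List.cons_prefix_cons.mp h with ⟨rfl, h2⟩
      exact List.cons_prefix_cons.mpr ⟨rfl, ih (fun hm => hsp (List.mem_cons_of_mem _ hm)) l t h2⟩

theorem pv_infix_append_sep (sub l t : List Char) (hsp : ' ' ∉ sub) :
    sub <:+: l ++ ' ' :: t ↔ (sub <:+: l ∨ sub <:+: t) := by
  constructor
  · intro h
    rw [← PySem.Chars.isIn_iff_infix, ← PySem.Chars.exists_prefix_drop_iff_isIn] at h
    obtain ⟨j, hj⟩ := h
    rw [List.drop_append] at hj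
    by_cases hjl : j ≤ l.length
    · have hz : j - l.length = 0 := Nat.sub_eq_zero_of_le hjl
      rw [hz, List.drop_zero] at hj
      left
      have : sub <+: l.drop j := pv_prefix_of_prefix_append_sep sub hsp _ _ hj
      exact this.isInfix.trans (List.drop_suffix j l).isInfix
    · rw [List.drop_eq_nil_of_le (by omega), List.nil_append] at hj
      have hstep : (' ' :: t).drop (j - l.length) = t.drop (j - l.length - 1) := by
        cases hk : j - l.length with
        | zero => omega
        | succ k => simp
      rw [hstep] at hj
      right
      exact hj.isInfix.trans (List.drop_suffix _ t).isInfix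
  · rintro (h | h)
    · exact h.trans ⟨[], ' ' :: t, rfl⟩
    · exact h.trans ((List.suffix_cons ' ' t).trans (List.suffix_append l (' ' :: t))).isInfix

theorem pv_isIn_join_space (sub : List Char) (hne : sub ≠ []) (hsp : ' ' ∉ sub) :
    ∀ parts : List (List Char),
      PySem.Chars.isIn sub (PySem.Chars.join [' '] parts) = parts.any (fun p => PySem.Chars.isIn sub p) := by
  intro parts
  induction parts with
  | nil =>
    simp only [List.any_nil, PySem.Chars.join_nil, Bool.eq_false_iff]
    intro h
    exact hne (List.infix_nil.mp ((PySem.Chars.isIn_iff_infix _ _).mp h))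
  | cons p rest ih =>
    cases rest with
    | nil => simp [PySem.Chars.join_singleton]
    | cons q rest' =>
      rw [PySem.Chars.join_cons_cons]
      simp only [List.any_cons] at ih ⊢
      rw [← ih]
      rw [show p ++ [' '] ++ PySem.Chars.join [' '] (q :: rest') = p ++ ' ' :: PySem.Chars.join [' '] (q :: rest') by simp]
      rw [Bool.eq_iff_iff, PySem.Chars.isIn_iff_infix, pv_infix_append_sep sub _ _ hsp]
      rw [Bool.or_eq_true, PySem.Chars.isIn_iff_infix, PySem.Chars.isIn_iff_infix]

-- any over a list commutes with any over another list
theorem pv_any_any_comm {α β : Type} (xs : List α) (ys : List β) (p : α → β → Bool) :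
    (xs.any fun a => ys.any fun b => p a b) = ys.any fun b => xs.any fun a => p a b := by
  rw [Bool.eq_iff_iff]; simp only [List.any_eq_true]; tauto

theorem pv_any_congr_mem {α : Type} (l : List α) (p q : α → Bool) (h : ∀ a ∈ l, p a = q a) :
    l.any p = l.any q := by
  induction l with
  | nil => rfl
  | cons x xs ih =>
    simp only [List.any_cons, h x List.mem_cons_self,
      ih (fun a ha => h a (List.mem_cons_of_mem _ ha))]

-- A's time-series test on the joined string equals B's per-file test, over the data files
theorem pv_ts_eq (data_files : List (List (String × String))) :
    (pvIndicators.any fun ind =>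
        PySem.Str.isIn ind (PySem.Str.join " " (data_files.map fun f => PySem.Str.lower (pvGetKey f))))
      = data_files.any fun f => pvIndicators.any fun ind => PySem.Str.isIn ind (PySem.Str.lower (pvGetKey f)) := by
  have h1 : ∀ ind ∈ pvIndicators,
      (PySem.Str.isIn ind (PySem.Str.join " " (data_files.map fun f => PySem.Str.lower (pvGetKey f))))
        = data_files.any fun f => PySem.Str.isIn ind (PySem.Str.lower (pvGetKey f)) := by
    intro ind hind
    have hne : ind.toList ≠ [] := by fin_cases hind <;> decide
    have hsp : ' ' ∉ ind.toList := by fin_cases hind <;> decide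
    rw [show PySem.Str.isIn ind (PySem.Str.join " " (data_files.map fun f => PySem.Str.lower (pvGetKey f)))
        = PySem.Chars.isIn ind.toList (PySem.Str.join " " (data_files.map fun f => PySem.Str.lower (pvGetKey f))).toList
        from by simp [PySem.Str.isIn_eq]]
    rw [PySem.Str.toList_join]
    rw [show (" ").toList = [' '] from rfl, List.map_map]
    rw [pv_isIn_join_space ind.toList hne hsp]
    rw [List.any_map]
    apply pv_any_congr_mem
    intro f _
    simp [PySem.Str.isIn_eq]
  rw [pv_any_congr_mem _ _ _ h1, pv_any_any_comm]

-- nonempty filter ↔ any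
theorem pv_any_eq_not_isEmpty_filter {α : Type} (l : List α) (p : α → Bool) :
    l.any p = !(l.filter p).isEmpty := by
  rcases h : l.any p <;> simp_all [List.isEmpty_iff, List.filter_eq_nil_iff, List.any_eq_true]

theorem pv_filter_isImg : (fun f => pvGetType f == some "images") = pvIsImg := rfl
theorem pv_filter_isData : (fun f => pvGetType f == some "data") = pvIsData := rfl

-- closed evaluation: no indicator occurs in the join of an empty name list
theorem pv_ts_empty :
    (pvIndicators.any fun ind => PySem.Str.isIn ind (PySem.Str.join " " ([] : List String))) = false := by
  decide

theorem analyze_analysis_capabilities_py_spec : Claim_equal_analyze_analysis_capabilities_py := by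
  intro files _
  unfold Spec_analyze_analysis_capabilities_py
  rw [analyze_analysis_capabilities_py_alt, pvFoldl_spec]
  simp only [analyze_analysis_capabilities_py, pv_filter_isImg, pv_filter_isData, Bool.false_or]
  -- express B's accumulated anys through the expressions A tests
  have hImg : files.any pvIsImg = !(files.filter pvIsImg).isEmpty := pv_any_eq_not_isEmpty_filter _ _
  have hData : files.any pvIsData = !(files.filter pvIsData).isEmpty := pv_any_eq_not_isEmpty_filter _ _
  have hPat : files.any pvPatOk
      = (((files.filter pvIsImg).filter (fun f => PySem.Str.isIn "." (pvGetKey f))).map (fun f => pvExtLower (pvGetKey f))).any (fun ext => pvSupported.contains ext) := by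
    rw [List.any_map, List.any_filter, List.any_filter]
    apply pv_any_congr_mem
    intro a _
    rw [Bool.eq_iff_iff]
    simp only [pvPatOk, Function.comp_apply, Bool.and_eq_true]
  have hTs : files.any pvTsOk
      = pvIndicators.any fun ind =>
          PySem.Str.isIn ind (PySem.Str.join " " ((files.filter pvIsData).map fun f => PySem.Str.lower (pvGetKey f))) := by
    rw [pv_ts_eq, List.any_filter]
    apply pv_any_congr_mem
    intro a _
    simp [pvTsOk]
  rw [hImg, hData, hPat, hTs]
  by_cases hD0 : (files.filter pvIsData).isEmpty = true
  · have hD' : files.filter pvIsData = [] := List.isEmpty_iff.mp hD0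
    by_cases hI0 : (files.filter pvIsImg).isEmpty = true
    · have hI' : files.filter pvIsImg = [] := List.isEmpty_iff.mp hI0
      simp only [hI', hD', List.filter_nil, List.map_nil, List.any_nil, List.isEmpty_nil, pv_ts_empty]
      decide
    · simp only [Bool.not_eq_true] at hI0
      rcases Bool.eq_false_or_eq_true ((((files.filter pvIsImg).filter (fun f => PySem.Str.isIn "." (pvGetKey f))).map (fun f => pvExtLower (pvGetKey f))).any (fun ext => pvSupported.contains ext)) with hP | hP <;>
        simp only [hI0, hP, hD', List.filter_nil, List.map_nil, List.isEmpty_nil, pv_ts_empty] <;> decide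
  · simp only [Bool.not_eq_true] at hD0
    by_cases hI0 : (files.filter pvIsImg).isEmpty = true
    · have hI' : files.filter pvIsImg = [] := List.isEmpty_iff.mp hI0
      rcases Bool.eq_false_or_eq_true (pvIndicators.any fun ind =>
          PySem.Str.isIn ind (PySem.Str.join " " ((files.filter pvIsData).map fun f => PySem.Str.lower (pvGetKey f)))) with hT | hT <;>
        rcases Bool.eq_false_or_eq_true (((files.filter pvIsData).filter (fun f => PySem.Str.endswith (PySem.Str.lower (pvGetKey f)) ".csv")).isEmpty) with hC | hC <;>
          simp only [hI', hD0, hT, hC, List.filter_nil, List.map_nil, List.isEmpty_nil] <;> decide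
    · simp only [Bool.not_eq_true] at hI0
      rcases Bool.eq_false_or_eq_true ((((files.filter pvIsImg).filter (fun f => PySem.Str.isIn "." (pvGetKey f))).map (fun f => pvExtLower (pvGetKey f))).any (fun ext => pvSupported.contains ext)) with hP | hP <;>
        rcases Bool.eq_false_or_eq_true (pvIndicators.any fun ind =>
          PySem.Str.isIn ind (PySem.Str.join " " ((files.filter pvIsData).map fun f => PySem.Str.lower (pvGetKey f)))) with hT | hT <;>
        rcases Bool.eq_false_or_eq_true (((files.filter pvIsData).filter (fun f => PySem.Str.endswith (PySem.Str.lower (pvGetKey f)) ".csv")).isEmpty) with hC | hC <;>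
          simp only [hI0, hD0, hP, hT, hC] <;> decide
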